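-- pv_equiv track=rewrite | github.com/shafinsiddique/algorithms-datastructures | leetcode/strings.py | lowest_uncommon_subsequence
-- ===== SOURCE A (Python) =====
-- def _getsubsequence(s):
--     subsequences = []
--
--     for x in range(len(s)):
--         for y in range(len(s), x, -1):
--             subsequences.append(s[x:y])
--
--     return subsequences
--
-- def lowest_uncommon_subsequence(s1, s2):
--     """return the length of the longest uncommon subsequence"""
--
--     s1_sub = _getsubsequence(s1)
--     s2_sub = _getsubsequence(s2)
--
--     uncommon_subs = []
--
--     for subs in s1_sub:
--         if subs not in s2_sub:
--             uncommon_subs.append(subs)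
--
--     for subs in s2_sub:
--         if subs not in s1_sub:
--             uncommon_subs.append(subs)
--
--     lengths = [len(subs) for subs in uncommon_subs]
--
--     return max(lengths)
-- ===== SOURCE B (Python) =====
-- def lowest_uncommon_subsequence(s1, s2):
--     """return the length of the longest uncommon subsequence"""
--     if s1 == s2:
--         return -1
--     return max(len(s1), len(s2))
-- ===== Notes on version B (the rewrite author's own statement) =====
-- stated objective: faster
-- what changed: Replaces the enumeration of all substrings of both strings and the quadratic membership filtering with the closed form max(len(s1), len(s2)) for unequal strings (the longer string is never a substring of the other, and no substring can be longer); for s1 == s2, where A raises ValueError (max of an empty list) and which Pre_ excludes, B returns -1 (the LeetCode convention).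
import Mathlib
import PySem

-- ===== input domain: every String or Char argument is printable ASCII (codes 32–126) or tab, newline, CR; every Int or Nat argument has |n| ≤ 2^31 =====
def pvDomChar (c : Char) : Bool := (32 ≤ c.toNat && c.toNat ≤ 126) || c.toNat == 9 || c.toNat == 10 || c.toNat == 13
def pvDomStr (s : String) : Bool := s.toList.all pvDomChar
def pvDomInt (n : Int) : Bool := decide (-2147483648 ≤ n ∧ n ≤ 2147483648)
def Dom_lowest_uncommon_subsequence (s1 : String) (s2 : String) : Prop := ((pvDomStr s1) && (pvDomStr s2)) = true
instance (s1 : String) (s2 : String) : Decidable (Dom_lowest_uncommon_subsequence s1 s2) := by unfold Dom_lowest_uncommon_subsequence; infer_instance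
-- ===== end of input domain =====

-- B replaces A's enumeration of all substrings of both strings (and the quadratic
-- membership filtering) by the closed form max(len(s1), len(s2)) for unequal strings;
-- objective: faster (asymptotic).

-- ===== PORT A =====
-- _getsubsequence, on the List Char side (string facts are proved on .toList)
def pvGetsubs (s : List Char) : List (List Char) :=
  (PySem.List.pyRange 0 s.length 1).foldl
    (fun subsequences x =>
      (PySem.List.pyRange s.length x (-1)).foldl
        (fun subsequences y => subsequences ++ [PySem.List.slice s (some x) (some y)])
        subsequences)
    []

def lowest_uncommon_subsequence (s1 : String) (s2 : String) : Int :=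
  let s1_sub := pvGetsubs s1.toList
  let s2_sub := pvGetsubs s2.toList
  let uncommon_subs :=
    s1_sub.foldl (fun acc subs => if !s2_sub.contains subs then acc ++ [subs] else acc) []
  let uncommon_subs :=
    s2_sub.foldl (fun acc subs => if !s1_sub.contains subs then acc ++ [subs] else acc) uncommon_subs
  let lengths := uncommon_subs.map (fun subs => (subs.length : Int))
  -- max(lengths); Pre_ excludes the empty case (Python raises ValueError there)
  (PySem.List.max? lengths (fun y => y)).getD 0

-- ===== PORT B =====
def lowest_uncommon_subsequence_alt (s1 : String) (s2 : String) : Int :=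
  if s1 = s2 then -1 else max (PySem.Str.len s1) (PySem.Str.len s2)

-- ===== PRECONDITION & SPEC =====
-- Pre_ excludes exactly s1 = s2, where A's max() is applied to an empty list and raises ValueError.
def Pre_lowest_uncommon_subsequence (s1 : String) (s2 : String) : Prop := s1 ≠ s2
instance (s1 : String) (s2 : String) : Decidable (Pre_lowest_uncommon_subsequence s1 s2) := by
  unfold Pre_lowest_uncommon_subsequence; infer_instance
def pvWitness_lowest_uncommon_subsequence : String × String := ("ab", "b")

def Spec_lowest_uncommon_subsequence (s1 : String) (s2 : String) (out : Int) : Prop :=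
  out = lowest_uncommon_subsequence_alt s1 s2
instance (s1 : String) (s2 : String) (out : Int) : Decidable (Spec_lowest_uncommon_subsequence s1 s2 out) := by
  unfold Spec_lowest_uncommon_subsequence; infer_instance

-- ===== CLAIM (what is proved, stated in full; the proofs are below) =====
def Claim_equal_lowest_uncommon_subsequence : Prop := ∀ (s1 : String) (s2 : String), Dom_lowest_uncommon_subsequence s1 s2 → Pre_lowest_uncommon_subsequence s1 s2 → Spec_lowest_uncommon_subsequence s1 s2 (lowest_uncommon_subsequence s1 s2)

-- ===== LEMMAS AND PROOFS =====

-- closed form of the nested append loops of _getsubsequence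
theorem pvGetsubs_eq (s : List Char) :
    pvGetsubs s =
      (PySem.List.pyRange 0 s.length 1).flatMap
        (fun x => (PySem.List.pyRange s.length x (-1)).map
          (fun y => PySem.List.slice s (some x) (some y))) := by
  unfold pvGetsubs
  simp only [PySem.List.foldl_append_singleton_eq_map, PySem.List.foldl_append_eq_flatMap,
    List.nil_append]

theorem mem_pvGetsubs_infix {t s : List Char} (h : t ∈ pvGetsubs s) : t <:+: s := by
  rw [pvGetsubs_eq] at h
  simp only [List.mem_flatMap, List.mem_map, PySem.List.mem_pyRange_one,
    PySem.List.mem_pyRange_neg_one] at h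
  obtain ⟨x, ⟨hx0, _⟩, y, ⟨hxy, _⟩, rfl⟩ := h
  rw [PySem.List.slice_toNat s hx0 (by omega)]
  exact ((List.take_prefix _ _).isInfix).trans (List.drop_suffix _ _).isInfix

theorem mem_pvGetsubs_self {s : List Char} (h : s ≠ []) : s ∈ pvGetsubs s := by
  rw [pvGetsubs_eq]
  simp only [List.mem_flatMap, List.mem_map, PySem.List.mem_pyRange_one,
    PySem.List.mem_pyRange_neg_one]
  have hlen : 0 < s.length := List.length_pos_iff.mpr h
  refine ⟨0, ⟨le_refl _, by exact_mod_cast hlen⟩, (s.length : Int),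
    ⟨by exact_mod_cast hlen, le_refl _⟩, ?_⟩
  rw [PySem.List.slice_toNat s (le_refl 0) (by positivity)]
  simp

-- every member of A's uncommon list is an infix of s1 or of s2
theorem mem_uncommon_infix {a b w : List Char}
    (h : w ∈ (pvGetsubs a).filter (fun subs => !(pvGetsubs b).contains subs) ++
          (pvGetsubs b).filter (fun subs => !(pvGetsubs a).contains subs)) :
    w <:+: a ∨ w <:+: b := by
  rcases List.mem_append.mp h with h1 | h2
  · exact Or.inl (mem_pvGetsubs_infix (List.mem_of_mem_filter h1))
  · exact Or.inr (mem_pvGetsubs_infix (List.mem_of_mem_filter h2))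

-- when a ≠ b, the longer string itself is in A's uncommon list
theorem longest_mem_uncommon {a b : List Char} (hab : a ≠ b) :
    ∃ w ∈ (pvGetsubs a).filter (fun subs => !(pvGetsubs b).contains subs) ++
            (pvGetsubs b).filter (fun subs => !(pvGetsubs a).contains subs),
      w.length = max a.length b.length := by
  rcases Nat.lt_trichotomy a.length b.length with hlt | heq | hgt
  · refine ⟨b, List.mem_append_right _ ?_, (Nat.max_eq_right (Nat.le_of_lt hlt)).symm⟩
    refine List.mem_filter.mpr ⟨mem_pvGetsubs_self (by intro h; simp [h] at hlt), ?_⟩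
    simp only [List.contains_eq_mem, Bool.not_eq_eq_eq_not, Bool.not_true, decide_eq_false_iff_not]
    intro hmem
    exact absurd (mem_pvGetsubs_infix hmem).length_le (by omega)
  · have ha : a ≠ [] := by
      intro h; apply hab; rw [h] at heq ⊢; exact (List.eq_nil_of_length_eq_zero heq.symm).symm
    refine ⟨a, List.mem_append_left _ ?_, (Nat.max_eq_left heq.ge).symm⟩
    refine List.mem_filter.mpr ⟨mem_pvGetsubs_self ha, ?_⟩
    simp only [List.contains_eq_mem, Bool.not_eq_eq_eq_not, Bool.not_true, decide_eq_false_iff_not]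
    intro hmem
    exact hab ((mem_pvGetsubs_infix hmem).eq_of_length heq)
  · refine ⟨a, List.mem_append_left _ ?_, (Nat.max_eq_left (Nat.le_of_lt hgt)).symm⟩
    refine List.mem_filter.mpr ⟨mem_pvGetsubs_self (by intro h; simp [h] at hgt), ?_⟩
    simp only [List.contains_eq_mem, Bool.not_eq_eq_eq_not, Bool.not_true, decide_eq_false_iff_not]
    intro hmem
    exact absurd (mem_pvGetsubs_infix hmem).length_le (by omega)

-- ===== VERDICT (by name: the statement is the Claim_ definition above) =====
theorem lowest_uncommon_subsequence_spec : Claim_equal_lowest_uncommon_subsequence := by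
  intro s1 s2 _ hne
  unfold Spec_lowest_uncommon_subsequence lowest_uncommon_subsequence lowest_uncommon_subsequence_alt
  rw [if_neg hne]
  have hab : s1.toList ≠ s2.toList := fun h => hne (String.toList_inj.mp h)
  -- rewrite the two filtering loops into filter form
  simp only [PySem.List.foldl_append_if (f := fun x : List Char => x), List.map_id', List.nil_append]
  set a := s1.toList with ha
  set b := s2.toList with hb
  set M : Nat := max a.length b.length with hM
  set u := (pvGetsubs a).filter (fun subs => !(pvGetsubs b).contains subs) ++
            (pvGetsubs b).filter (fun subs => !(pvGetsubs a).contains subs) with hu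
  obtain ⟨w, hwmem, hwlen⟩ := longest_mem_uncommon hab
  rw [← hu] at hwmem
  have hne' : u.map (fun subs => (subs.length : Int)) ≠ [] := by
    intro h
    rw [List.map_eq_nil_iff] at h
    rw [h] at hwmem
    exact List.not_mem_nil hwmem
  obtain ⟨m, hm⟩ : ∃ m, PySem.List.max? (u.map (fun subs => (subs.length : Int)))
      (fun y => y) = some m :=
    Option.ne_none_iff_exists'.mp (fun h => hne' ((PySem.List.max?_eq_none_iff _ _).mp h))
  rw [hm, Option.getD_some]
  -- m is the length of some member of u, so m ≤ M; M is a length in u, so M ≤ m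
  obtain ⟨w', hw', hw'eq⟩ := List.mem_map.mp (PySem.List.max?_mem hm)
  have hle : m ≤ (M : Int) := by
    rw [← hw'eq]
    rcases mem_uncommon_infix (hu ▸ hw') with h | h
    · exact_mod_cast le_trans h.length_le (le_max_left _ _)
    · exact_mod_cast le_trans h.length_le (le_max_right _ _)
  have hge : (M : Int) ≤ m :=
    PySem.List.max?_isMax hm _ (List.mem_map.mpr ⟨w, hwmem, by rw [hwlen]⟩)
  rw [le_antisymm hle hge]
  simp only [PySem.Str.len_eq, ← ha, ← hb, hM]
  exact_mod_cast (Nat.cast_max ..).symm
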